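-- pv_equiv track=rewrite | github.com/kawaii-justice/Project-Wannabe | src/core/prompt_builder.py | split_main_text
-- ===== SOURCE A (Python) =====
-- def split_main_text(text: str) -> tuple[str, str]:
--     """
--     Splits the input text into the main part and the tail, preserving all
--     original lines. The tail is defined as the 3 lines ending at the
--     second-to-last content line. The last content line itself is NOT part
--     of the return value.
--
--     Args:
--         text: The main text input.
--
--     Returns:
--         A tuple containing (main_part_text, tail_text).
--         Returns ("", "") if the text has less than 4 content lines,
--         as a split is not meaningful.
--     """
--     if not text:
--         return "", ""
--
--     lines = text.splitlines()
--     # Find indices of all lines with content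
--     content_line_indices = [i for i, line in enumerate(lines) if line.strip()]
--
--     # If not enough content for a split, return empty parts.
--     if len(content_line_indices) < 4:
--         return "", ""
--
--     # The tail is based on the second-to-last content line.
--     # This is the end point of the tail (inclusive).
--     tail_end_index = content_line_indices[-2]
--
--     # The tail starts 2 lines before its end point (for a total of 3 lines).
--     tail_start_index = tail_end_index - 2
--     if tail_start_index < 0:
--         tail_start_index = 0
--
--     # The tail includes the end line, so we slice up to end_index + 1.
--     tail_lines = lines[tail_start_index : tail_end_index + 1]
--     tail_text = "\n".join(tail_lines)
--
--     # The main part is everything before the tail's start.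
--     main_part_lines = lines[:tail_start_index]
--     main_part_text = "\n".join(main_part_lines)
--
--     return main_part_text, tail_text
-- ===== SOURCE B (Python) =====
-- def split_main_text(text: str) -> tuple[str, str]:
--     lines = text.splitlines()
--     # drop trailing blank lines
--     while lines and not lines[-1].strip():
--         lines.pop()
--     # drop the last content line itself (it is never part of the result)
--     if lines:
--         lines.pop()
--     # drop blank lines now trailing; the new last line is the tail's end
--     while lines and not lines[-1].strip():
--         lines.pop()
--     # need at least 3 content lines left (i.e. 4 in the original text)
--     if sum(1 for line in lines if line.strip()) < 3:
--         return "", ""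
--     return "\n".join(lines[:-3]), "\n".join(lines[-3:])
-- ===== Notes on version B (the rewrite author's own statement) =====
-- stated objective: alternative
-- what changed: Instead of materializing the index table of all content lines and indexing it at [-2], B pops trailing blank lines and the last content line off the end, making the list itself end at the tail's last line, then slices the last 3 lines off.
import Mathlib
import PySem

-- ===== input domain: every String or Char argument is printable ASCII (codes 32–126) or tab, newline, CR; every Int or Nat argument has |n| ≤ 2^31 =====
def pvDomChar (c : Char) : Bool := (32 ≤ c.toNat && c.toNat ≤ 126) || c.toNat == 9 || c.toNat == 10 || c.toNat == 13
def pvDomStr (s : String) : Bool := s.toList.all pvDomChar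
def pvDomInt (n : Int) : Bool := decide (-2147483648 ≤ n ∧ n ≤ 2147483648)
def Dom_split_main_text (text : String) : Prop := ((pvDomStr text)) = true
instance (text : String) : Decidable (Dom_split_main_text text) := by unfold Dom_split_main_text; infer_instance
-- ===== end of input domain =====

-- B trims trailing blanks / the last content line off the end instead of building an index
-- table of all content lines and indexing it at [-2]: a different decomposition (simpler).

-- Python truthiness of line.strip(): the stripped line is non-empty (shared by both ports).
def pvContent (l : String) : Bool := !(PySem.Str.strip l).toList.isEmpty

-- ===== PORT A =====
def split_main_text (text : String) : String × String :=
  if text.toList.isEmpty then ("", "")   -- `if not text`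
  else
    let lines := PySem.Str.splitlines text
    let contentLineIndices :=
      ((PySem.List.enumerate lines 0).filter (fun p => pvContent p.2)).map (·.1)
    if PySem.List.len contentLineIndices < 4 then ("", "")
    else
      let tailEndIndex := PySem.List.pyGetD contentLineIndices (-2) 0
      let tailStartIndex0 := tailEndIndex - 2
      let tailStartIndex := if tailStartIndex0 < 0 then 0 else tailStartIndex0
      let tailLines := PySem.List.slice lines (some tailStartIndex) (some (tailEndIndex + 1))
      let tailText := PySem.Str.join "\n" tailLines
      let mainPartLines := PySem.List.slice lines none (some tailStartIndex)
      let mainPartText := PySem.Str.join "\n" mainPartLines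
      (mainPartText, tailText)

-- ===== PORT B =====
-- `while lines and not lines[-1].strip(): lines.pop()`
def pvTrimEnd (ls : List String) : List String :=
  if h : ls = [] then ls
  else if pvContent (ls.getLast h) then ls
  else pvTrimEnd ls.dropLast
termination_by ls.length
decreasing_by
  simpa [List.length_dropLast] using Nat.sub_lt (List.length_pos_iff.mpr h) one_pos

def split_main_text_alt (text : String) : String × String :=
  let lines0 := PySem.Str.splitlines text
  let lines1 := pvTrimEnd lines0
  let lines2 := lines1.dropLast          -- `if lines: lines.pop()`
  let lines3 := pvTrimEnd lines2
  if (lines3.countP (fun l => pvContent l) : Int) < 3 then ("", "")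
  else (PySem.Str.join "\n" (PySem.List.slice lines3 none (some (-3))),
        PySem.Str.join "\n" (PySem.List.slice lines3 (some (-3)) none))

-- ===== PRECONDITION & SPEC =====
def Spec_split_main_text (text : String) (out : String × String) : Prop := out = split_main_text_alt text
instance (text : String) (out : String × String) : Decidable (Spec_split_main_text text out) := by unfold Spec_split_main_text; infer_instance

-- ===== CLAIM (what is proved, stated in full; the proofs are below) =====
def Claim_equal_split_main_text : Prop := ∀ (text : String), Dom_split_main_text text → Spec_split_main_text text (split_main_text text)

-- ===== LEMMAS AND PROOFS =====

theorem pvTrimEnd_nil : pvTrimEnd [] = [] := by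
  unfold pvTrimEnd; simp

theorem pvTrimEnd_concat_content (xs : List String) (b : String)
    (hb : pvContent b = true) : pvTrimEnd (xs ++ [b]) = xs ++ [b] := by
  rw [pvTrimEnd]
  rw [dif_neg (by simp : ¬ (xs ++ [b] = []))]
  rw [List.getLast_concat, if_pos hb]

theorem pvTrimEnd_concat_blank (xs : List String) (b : String)
    (hb : pvContent b = false) : pvTrimEnd (xs ++ [b]) = pvTrimEnd xs := by
  rw [pvTrimEnd]
  rw [dif_neg (by simp : ¬ (xs ++ [b] = []))]
  rw [List.getLast_concat, if_neg (by simp [hb]), List.dropLast_concat]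

theorem pvTrimEnd_allblank (ls : List String) (h : ∀ l ∈ ls, pvContent l = false) :
    pvTrimEnd ls = [] := by
  induction ls using List.reverseRecOn with
  | nil => exact pvTrimEnd_nil
  | append_singleton xs b ih =>
    rw [pvTrimEnd_concat_blank xs b (h b (by simp))]
    exact ih fun l hl => h l (by simp [hl])

theorem pvTrimEnd_decomp (u : List String) (y : String) (r : List String)
    (hy : pvContent y = true) (hr : ∀ l ∈ r, pvContent l = false) :
    pvTrimEnd (u ++ y :: r) = u ++ [y] := by
  induction r using List.reverseRecOn with
  | nil => exact pvTrimEnd_concat_content u y hy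
  | append_singleton r' b ih =>
    rw [show u ++ y :: (r' ++ [b]) = (u ++ y :: r') ++ [b] by simp]
    rw [pvTrimEnd_concat_blank _ b (hr b (by simp))]
    exact ih fun l hl => hr l (by simp [hl])

-- last-content-line decomposition
theorem decomp_last (ls : List String) (h : 0 < ls.countP (fun l => pvContent l)) :
    ∃ u y r, ls = u ++ y :: r ∧ pvContent y = true ∧ ∀ l ∈ r, pvContent l = false := by
  induction ls using List.reverseRecOn with
  | nil => simp at h
  | append_singleton xs b ih =>
    by_cases hb : pvContent b = true
    · exact ⟨xs, b, [], by simp, hb, by simp⟩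
    · have hb' : pvContent b = false := by simpa using hb
      have : 0 < xs.countP (fun l => pvContent l) := by
        simpa [List.countP_append, hb'] using h
      obtain ⟨u, y, r, he, hy, hr⟩ := ih this
      refine ⟨u, y, r ++ [b], by rw [he]; simp, hy, ?_⟩
      intro l hl
      rcases List.mem_append.mp hl with hl | hl
      · exact hr l hl
      · rw [List.mem_singleton.mp hl]; exact hb'

theorem filter_enum_blank (ls : List String) (s : Int)
    (h : ∀ l ∈ ls, pvContent l = false) :
    (PySem.List.enumerate ls s).filter (fun p => pvContent p.2) = [] := by
  induction ls generalizing s with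
  | nil => simp [PySem.List.enumerate]
  | cons x xs ih =>
    rw [PySem.List.enumerate_cons,
        List.filter_cons_of_neg (by simp [h x (by simp)])]
    exact ih _ fun l hl => h l (by simp [hl])

theorem length_filter_enum (ls : List String) (s : Int) :
    ((PySem.List.enumerate ls s).filter (fun p => pvContent p.2)).length
      = ls.countP (fun l => pvContent l) := by
  induction ls generalizing s with
  | nil => simp [PySem.List.enumerate]
  | cons x xs ih =>
    rw [PySem.List.enumerate_cons]
    by_cases hx : pvContent x = true
    · rw [List.filter_cons_of_pos (by simpa using hx)]
      simp [hx, ih (s + 1)]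
    · have hx' : pvContent x = false := by simpa using hx
      rw [List.filter_cons_of_neg (by simp [hx'])]
      simp [hx', ih (s + 1)]

theorem filter_enum_decomp (p : List String) (x : String) (q : List String)
    (y : String) (r : List String) (hx : pvContent x = true) (hy : pvContent y = true)
    (hq : ∀ l ∈ q, pvContent l = false) (hr : ∀ l ∈ r, pvContent l = false) :
    ((PySem.List.enumerate (p ++ x :: (q ++ y :: r)) 0).filter (fun pr => pvContent pr.2)).map (·.1)
      = (((PySem.List.enumerate p 0).filter (fun pr => pvContent pr.2)).map (·.1))
        ++ [(p.length : Int), (p.length : Int) + 1 + q.length] := by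
  rw [PySem.List.enumerate_append, List.filter_append, List.map_append]
  congr 1
  rw [PySem.List.enumerate_cons, List.filter_cons_of_pos (by simpa using hx),
      PySem.List.enumerate_append, List.filter_append, filter_enum_blank q _ hq,
      PySem.List.enumerate_cons, List.filter_cons_of_pos (by simpa using hy),
      filter_enum_blank r _ hr]
  simp

-- xs[-2] of a list ending in [a, b] is a
theorem pyGetD_penultimate (Ip : List Int) (a b : Int) :
    PySem.List.pyGetD (Ip ++ [a, b]) (-2) 0 = a := by
  rw [PySem.List.pyGetD_neg_ofNat _ 2 0 (by omega) (by simp)]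
  simp [List.getElem_append_right]

-- the two ports agree line-list by line-list
theorem main_eq (text : String) :
    split_main_text text = split_main_text_alt text := by
  set ls := PySem.Str.splitlines text with hls
  by_cases he : text.toList.isEmpty
  · -- empty text: both return ("", "")
    have ht : text = "" := String.toList_eq_nil_iff.mp (List.isEmpty_iff.mp he)
    subst ht
    have h1 : PySem.Str.splitlines "" = [] := by decide
    have hA : split_main_text "" = ("", "") := by
      unfold split_main_text; simp
    have hB : split_main_text_alt "" = ("", "") := by
      unfold split_main_text_alt
      simp [h1, pvTrimEnd_nil]
    rw [hA, hB]
  · -- non-empty text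
    unfold split_main_text split_main_text_alt
    rw [← hls]
    simp only [he]
    set m := ls.countP (fun l => pvContent l) with hm
    by_cases hm0 : m = 0
    · -- no content lines at all
      have hbl : ∀ l ∈ ls, pvContent l = false := by
        intro l hl
        by_contra hc
        have : 0 < m := by
          rw [hm]
          exact List.countP_pos_iff.mpr ⟨l, hl, by simpa using hc⟩
        omega
      rw [filter_enum_blank ls 0 hbl, pvTrimEnd_allblank ls hbl]
      simp [PySem.List.len, pvTrimEnd_nil]
    · -- at least one content line: peel the last one
      obtain ⟨u, y, r, hdu, hy, hr⟩ := decomp_last ls (by omega)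
      have htrim1 : pvTrimEnd ls = u ++ [y] := by
        rw [hdu]; exact pvTrimEnd_decomp u y r hy hr
      have hr0 : r.countP (fun l => pvContent l) = 0 :=
        List.countP_eq_zero.mpr (fun l hl => by simp [hr l hl])
      have hcu : u.countP (fun l => pvContent l) = m - 1 := by
        have : m = u.countP (fun l => pvContent l) + 1 := by
          rw [hm, hdu]
          simp [List.countP_append, hy, hr0]
        omega
      rw [htrim1]
      have hpop : (u ++ [y]).dropLast = u := by simp
      rw [hpop]
      by_cases hu0 : u.countP (fun l => pvContent l) = 0
      · -- m = 1: B trims to [], A's index list has length 1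
        have hbu : ∀ l ∈ u, pvContent l = false := by
          intro l hl; by_contra hc
          have : 0 < u.countP (fun l => pvContent l) :=
            List.countP_pos_iff.mpr ⟨l, hl, by simpa using hc⟩
          omega
        have hm1 : m = 1 := by omega
        rw [pvTrimEnd_allblank u hbu, hdu]
        have hfl : ((PySem.List.enumerate (u ++ y :: r) 0).filter
            (fun pr => pvContent pr.2)).length = m := by
          rw [length_filter_enum, ← hdu, ← hm]
        have : PySem.List.len (((PySem.List.enumerate (u ++ y :: r) 0).filter
            (fun pr => pvContent pr.2)).map (·.1)) < 4 := by
          simp [PySem.List.len_eq, hfl, hm1]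
        simp only [this]
        simp
      · -- m ≥ 2: peel the second-to-last content line
        obtain ⟨p, x, q, hup, hx, hq⟩ := decomp_last u (by omega)
        have htrim2 : pvTrimEnd u = p ++ [x] := by
          rw [hup]; exact pvTrimEnd_decomp p x q hx hq
        rw [htrim2]
        have hq0 : q.countP (fun l => pvContent l) = 0 :=
          List.countP_eq_zero.mpr (fun l hl => by simp [hq l hl])
        have hcp : p.countP (fun l => pvContent l) = m - 2 := by
          have : u.countP (fun l => pvContent l)
              = p.countP (fun l => pvContent l) + 1 := by
            rw [hup]
            simp [List.countP_append, hx, hq0]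
          omega
        have hdu2 : ls = p ++ x :: (q ++ y :: r) := by rw [hdu, hup]; simp
        set idxs := ((PySem.List.enumerate ls 0).filter (fun pr => pvContent pr.2)).map (·.1)
          with hidxs
        have hlenidx : idxs.length = m := by
          rw [hidxs, List.length_map, length_filter_enum, ← hm]
        have hcount3 : (p ++ [x]).countP (fun l => pvContent l) = m - 1 := by
          simp [List.countP_append, hx, hcp]
          omega
        by_cases hm4 : m < 4
        · -- both return ("", "")
          have hA : PySem.List.len idxs < 4 := by
            rw [PySem.List.len_eq, hlenidx]; exact_mod_cast hm4
          have hB : ((p ++ [x]).countP (fun l => pvContent l) : Int) < 3 := by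
            rw [hcount3]; omega
          rw [if_pos hA, if_pos hB]
          simp
        · -- the real split; p has ≥ 2 content lines, so p.length ≥ 2
          have hm4' : 4 ≤ m := by omega
          have hpl2 : 2 ≤ p.length := by
            have := List.countP_le_length (p := fun l => pvContent l) (l := p)
            omega
          have hA : ¬ PySem.List.len idxs < 4 := by
            rw [PySem.List.len_eq, hlenidx]; omega
          have hB : ¬ ((p ++ [x]).countP (fun l => pvContent l) : Int) < 3 := by
            rw [hcount3]; omega
          rw [if_neg hA, if_neg hB]
          -- identify the index list
          have hidx2 : idxs = (((PySem.List.enumerate p 0).filter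
              (fun pr => pvContent pr.2)).map (·.1))
              ++ [(p.length : Int), (p.length : Int) + 1 + q.length] := by
            rw [hidxs, hdu2]
            exact filter_enum_decomp p x q y r hx hy hq hr
          have hlenIp : (((PySem.List.enumerate p 0).filter
              (fun pr => pvContent pr.2)).map (·.1)).length = m - 2 := by
            rw [List.length_map, length_filter_enum, hcp]
          -- tail_end = p.length
          have hte : PySem.List.pyGetD idxs (-2) 0 = (p.length : Int) := by
            rw [hidx2]
            exact pyGetD_penultimate _ _ _
          rw [hte]
          have hts : ¬ ((p.length : Int) - 2 < 0) := by omega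
          simp only [hts, if_false]
          -- main parts agree
          have hmainA : PySem.List.slice ls none (some ((p.length : Int) - 2))
              = p.take (p.length - 2) := by
            rw [PySem.List.slice_to ls (by omega)]
            rw [show ((p.length : Int) - 2).toNat = p.length - 2 by omega]
            rw [hdu2, List.take_append_of_le_length (by omega)]
          have hmainB : PySem.List.slice (p ++ [x]) none (some (-3))
              = p.take (p.length - 2) := by
            rw [PySem.List.slice_to_neg_ofNat (p ++ [x]) 3 (by omega)]
            rw [List.length_append, List.length_singleton,
                show p.length + 1 - 3 = p.length - 2 by omega,
                List.take_append_of_le_length (by omega)]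
          -- tails agree
          have htailA : PySem.List.slice ls (some ((p.length : Int) - 2))
              (some ((p.length : Int) + 1)) = p.drop (p.length - 2) ++ [x] := by
            rw [PySem.List.slice_toNat ls (by omega) (by omega)]
            rw [show ((p.length : Int) - 2).toNat = p.length - 2 by omega,
                show ((p.length : Int) + 1).toNat = p.length + 1 by omega,
                show p.length + 1 - (p.length - 2) = 3 by omega]
            rw [hdu2, show p ++ x :: (q ++ y :: r) = (p ++ [x]) ++ (q ++ y :: r) by simp,
                List.drop_append_of_le_length (by simp; omega)]
            rw [List.take_append]
            have hdl : ((p ++ [x]).drop (p.length - 2)).length = 3 := by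
              simp; omega
            rw [List.take_of_length_le (le_of_eq hdl), hdl]
            simp [List.drop_append_of_le_length (show p.length - 2 ≤ p.length by omega)]
          have htailB : PySem.List.slice (p ++ [x]) (some (-3)) none
              = p.drop (p.length - 2) ++ [x] := by
            rw [PySem.List.slice_from_neg_ofNat (p ++ [x]) 3 (by omega)]
            rw [List.length_append, List.length_singleton,
                show p.length + 1 - 3 = p.length - 2 by omega]
            rw [List.drop_append_of_le_length (by omega)]
          rw [hmainA, hmainB, htailA, htailB]
          simp

-- ===== VERDICT (by name: the statement is the Claim_ definition above) =====
theorem split_main_text_spec : Claim_equal_split_main_text := by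
  intro text _
  unfold Spec_split_main_text
  exact main_eq text
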